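-- pv_equiv track=rewrite | github.com/Windere/HiFP8 | quantization/calibration.py | _get_reduction_params
-- ===== SOURCE A (Python) =====
-- def _get_reduction_params(block_size, input_size):
--     """
--     Helper to compute reduction dimensions for min/max computation.
--
--     Args:
--         block_size: Target block size tuple.
--         input_size: Input tensor size.
--
--     Returns:
--         (shape_for_reduction, reduction_dims) tuple.
--     """
--     shape_for_reduction = []
--     reduction_dims = []
--     dim_offset = 0
--
--     for i, (block, dim) in enumerate(zip(block_size, input_size)):
--         if block == dim:
--             # Reduce this entire dimension
--             shape_for_reduction.append(dim)
--             reduction_dims.append(dim_offset)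
--             dim_offset += 1
--         else:
--             # Split dimension into (num_blocks, block_size)
--             num_blocks = dim // block
--             shape_for_reduction.extend([num_blocks, block])
--             reduction_dims.append(dim_offset + 1)  # Reduce block dimension
--             dim_offset += 2
--
--     return tuple(shape_for_reduction), tuple(reduction_dims)
-- ===== SOURCE B (Python) =====
-- def _get_reduction_params(block_size, input_size):
--     # Two-pass decomposition: first build per-dimension segments, then derive
--     # both outputs from the segment list (shape = concatenation; each
--     # reduction dim = prefix sum of segment widths + width - 1).
--     segs = [([dim], 1) if block == dim else ([dim // block, block], 2)
--             for block, dim in zip(block_size, input_size)]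
--     widths = [w for _, w in segs]
--     shape_for_reduction = [x for seg, _ in segs for x in seg]
--     offsets = [0]
--     for w in widths:
--         offsets.append(offsets[-1] + w)
--     reduction_dims = [o + w - 1 for o, w in zip(offsets, widths)]
--     return tuple(shape_for_reduction), tuple(reduction_dims)
-- ===== Notes on version B (the rewrite author's own statement) =====
-- stated objective: alternative
-- what changed: Replaces the single scan with a running dim_offset counter by a two-pass decomposition: a segment list ([dim],1) / ([dim//block,block],2) is built first, then the shape is its concatenation and each reduction dim is a prefix sum of segment widths plus width-1.
import Mathlib
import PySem

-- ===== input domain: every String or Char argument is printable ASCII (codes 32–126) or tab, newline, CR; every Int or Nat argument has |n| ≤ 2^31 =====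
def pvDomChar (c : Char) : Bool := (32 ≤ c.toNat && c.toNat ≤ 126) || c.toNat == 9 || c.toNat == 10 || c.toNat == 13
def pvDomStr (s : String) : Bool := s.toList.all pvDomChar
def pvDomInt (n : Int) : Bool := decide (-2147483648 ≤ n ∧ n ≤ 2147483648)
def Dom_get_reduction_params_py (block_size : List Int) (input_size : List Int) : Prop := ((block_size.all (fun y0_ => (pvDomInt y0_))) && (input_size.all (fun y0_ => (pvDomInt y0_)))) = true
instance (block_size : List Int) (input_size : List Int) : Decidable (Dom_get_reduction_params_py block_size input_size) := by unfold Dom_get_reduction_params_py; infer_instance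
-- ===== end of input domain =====

-- B replaces A's single scan with a running dim_offset by a two-pass decomposition
-- (segment list, then prefix sums of segment widths); same cost class, alternative structure.


-- ===== PORT A =====
-- literal transliteration of A: one fold over zip(block_size, input_size)
-- carrying (shape_for_reduction, reduction_dims, dim_offset)
def get_reduction_params_py (block_size : List Int) (input_size : List Int) : List Int × List Int :=
  let st := (List.zip block_size input_size).foldl
    (fun (s : List Int × List Int × Int) bd =>
      if bd.1 = bd.2 then
        (s.1 ++ [bd.2], s.2.1 ++ [s.2.2], s.2.2 + 1)
      else
        (s.1 ++ [PySem.Int.floordiv bd.2 bd.1, bd.1], s.2.1 ++ [s.2.2 + 1], s.2.2 + 2))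
    ([], [], 0)
  (st.1, st.2.1)

-- ===== PORT B =====
-- B helper: segment for one (block, dim) pair, with its width
def pvSegOf (bd : Int × Int) : List Int × Int :=
  if bd.1 = bd.2 then ([bd.2], 1) else ([PySem.Int.floordiv bd.2 bd.1, bd.1], 2)

def get_reduction_params_py_alt (block_size : List Int) (input_size : List Int) : List Int × List Int :=
  let segs := (List.zip block_size input_size).map pvSegOf
  let widths := segs.map Prod.snd
  let shape := segs.flatMap Prod.fst
  let offsets := widths.scanl (· + ·) 0   -- Source B's running-offsets loop
  let dims := List.zipWith (fun o w => o + w - 1) offsets widths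
  (shape, dims)

-- ===== PRECONDITION & SPEC =====
-- Pre_ excludes exactly the inputs on which A raises ZeroDivisionError:
-- some zipped pair has block == 0 with dim != block (then A computes dim // 0).
def Pre_get_reduction_params_py (block_size : List Int) (input_size : List Int) : Prop :=
  ∀ bd ∈ List.zip block_size input_size, bd.1 = bd.2 ∨ bd.1 ≠ 0
instance (block_size : List Int) (input_size : List Int) : Decidable (Pre_get_reduction_params_py block_size input_size) := by unfold Pre_get_reduction_params_py; infer_instance
def pvWitness_get_reduction_params_py : List Int × List Int := ([2, 3], [6, 3])

def Spec_get_reduction_params_py (block_size : List Int) (input_size : List Int) (out : List Int × List Int) : Prop := out = get_reduction_params_py_alt block_size input_size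
instance (block_size : List Int) (input_size : List Int) (out : List Int × List Int) : Decidable (Spec_get_reduction_params_py block_size input_size out) := by unfold Spec_get_reduction_params_py; infer_instance

-- ===== CLAIM (what is proved, stated in full; the proofs are below) =====
def Claim_equal_get_reduction_params_py : Prop := ∀ (block_size : List Int) (input_size : List Int), Dom_get_reduction_params_py block_size input_size → Pre_get_reduction_params_py block_size input_size → Spec_get_reduction_params_py block_size input_size (get_reduction_params_py block_size input_size)

-- ===== LEMMAS AND PROOFS =====

-- reference dims sequence: offsets accumulated over segment widths
def pvDims (off : Int) : List (List Int × Int) → List Int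
  | [] => []
  | (_, w) :: l => (off + w - 1) :: pvDims (off + w) l

lemma pvDims_B (l : List (List Int × Int)) (off : Int) :
    List.zipWith (fun o w => o + w - 1) ((l.map Prod.snd).scanl (· + ·) off) (l.map Prod.snd)
      = pvDims off l := by
  induction l generalizing off with
  | nil => simp [pvDims]
  | cons hd tl ih => simp [List.scanl_cons, pvDims, ih]

lemma pvFoldA (l : List (Int × Int)) (shape dims : List Int) (off : Int) :
    l.foldl
      (fun (s : List Int × List Int × Int) bd =>
        if bd.1 = bd.2 then
          (s.1 ++ [bd.2], s.2.1 ++ [s.2.2], s.2.2 + 1)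
        else
          (s.1 ++ [PySem.Int.floordiv bd.2 bd.1, bd.1], s.2.1 ++ [s.2.2 + 1], s.2.2 + 2))
      (shape, dims, off)
    = (shape ++ (l.map pvSegOf).flatMap Prod.fst,
       dims ++ pvDims off (l.map pvSegOf),
       off + ((l.map pvSegOf).map Prod.snd).sum) := by
  induction l generalizing shape dims off with
  | nil => simp [pvDims]
  | cons hd tl ih =>
    by_cases h : hd.1 = hd.2
    · simp only [List.foldl_cons, if_pos h, List.map_cons]
      rw [ih]
      simp [pvSegOf, h, pvDims, List.append_assoc]
      ring
    · simp only [List.foldl_cons, if_neg h, List.map_cons]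
      rw [ih]
      simp [pvSegOf, h, pvDims, List.append_assoc]
      exact ⟨by ring, by ring⟩

-- ===== VERDICT (by name: the statement is the Claim_ definition above) =====
theorem get_reduction_params_py_spec : Claim_equal_get_reduction_params_py := by
  intro bs is _ _
  unfold Spec_get_reduction_params_py get_reduction_params_py get_reduction_params_py_alt
  simp only [pvFoldA, pvDims_B, List.nil_append]
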